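-- pv_equiv track=rewrite | github.com/franco126/Progetto-analisi-dei-dati-per-la-sicurezza | main.py | top_attribute_selection
-- ===== SOURCE A (Python) =====
-- def top_attribute_selection ( sorted_features_list, number_of_top_features ):
--     """
--     metodo utilizzato per estrarre il nome dei primi n attributi dal dataset ordinato in base alla mutual info
--     :param data:
--     :param sorted_features_list:
--     :param number_of_top_features:
--     :return:
--     """
--     dictionary = dict(sorted_features_list)
--     topAttributeList = []
--     for attribute in dictionary.keys():
--         topAttributeList.append(attribute)
--         if (len(topAttributeList) == number_of_top_features):
--             break
--     # all'elenco dei migliori n attributi aggiungo il nome dell'attributo classe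
--     #topAttributeList.append(data.columns.values[data.shape[1] - 1])
--     return topAttributeList
-- ===== SOURCE B (Python) =====
-- def top_attribute_selection(sorted_features_list, number_of_top_features):
--     """Duplicate-elimination by repeated filtering: take the head key, drop all of
--     its later occurrences from the remaining pairs, repeat; stop once the result
--     has number_of_top_features names (a non-positive n therefore yields all keys,
--     as in the original).  No dict and no seen-set are ever built."""
--     result = []
--     pending = sorted_features_list
--     while pending:
--         attribute = pending[0][0]
--         result.append(attribute)
--         if len(result) == number_of_top_features:
--             break
--         pending = [p for p in pending[1:] if p[0] != attribute]
--     return result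
-- ===== Notes on version B (the rewrite author's own statement) =====
-- stated objective: alternative
-- what changed: B never builds a dict or a seen-set: it repeatedly takes the head key and filters all its later occurrences out of the remaining pairs, stopping once n names are collected, instead of A's build-the-whole-dict-then-scan-its-keys two-phase scheme.
import Mathlib
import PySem

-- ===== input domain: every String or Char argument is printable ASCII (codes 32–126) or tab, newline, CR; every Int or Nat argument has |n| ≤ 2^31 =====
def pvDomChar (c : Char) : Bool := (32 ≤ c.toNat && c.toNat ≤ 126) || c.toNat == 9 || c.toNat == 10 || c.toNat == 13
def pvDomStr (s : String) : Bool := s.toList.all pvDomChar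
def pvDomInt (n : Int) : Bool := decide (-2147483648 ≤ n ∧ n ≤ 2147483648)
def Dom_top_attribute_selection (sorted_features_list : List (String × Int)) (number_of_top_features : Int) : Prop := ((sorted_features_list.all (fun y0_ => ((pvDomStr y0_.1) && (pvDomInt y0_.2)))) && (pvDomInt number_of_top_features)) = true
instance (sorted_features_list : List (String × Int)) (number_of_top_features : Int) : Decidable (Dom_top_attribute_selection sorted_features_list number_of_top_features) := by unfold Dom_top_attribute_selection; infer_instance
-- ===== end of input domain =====

-- B replaces A's build-full-dict-then-scan-keys with repeated head-take-and-filter over the raw pairs (alternative decomposition; same result).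


-- ===== PORT A =====
-- A's 'for attribute in dictionary.keys(): append; if len == n: break'
def pvALoop (n : Int) : List String → List String → List String
  | acc, [] => acc
  | acc, k :: ks =>
    let acc' := acc ++ [k]
    if (acc'.length : Int) = n then acc' else pvALoop n acc' ks

def top_attribute_selection (sorted_features_list : List (String × Int)) (number_of_top_features : Int) : List String :=
  let dictionary := PySem.Dict.ofList sorted_features_list
  pvALoop number_of_top_features [] dictionary.keys

-- ===== PORT B =====
-- B's 'while pending: take head key, append; break when len == n; filter the head key out of the rest'
def pvBGo (n : Int) (pending : List (String × Int)) (result : List String) : List String :=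
  match pending with
  | [] => result
  | p :: rest =>
    let result' := result ++ [p.1]
    if (result'.length : Int) = n then result'
    else pvBGo n (rest.filter (fun q => q.1 ≠ p.1)) result'
termination_by pending.length
decreasing_by
  simp only [List.length_unattach]
  calc (List.filter _ rest.attach).length ≤ rest.attach.length := List.length_filter_le _ _
    _ = rest.length := List.length_attach
    _ < rest.length + 1 := Nat.lt_succ_self _

def top_attribute_selection_alt (sorted_features_list : List (String × Int)) (number_of_top_features : Int) : List String :=
  pvBGo number_of_top_features sorted_features_list []

-- ===== PRECONDITION & SPEC =====
def Spec_top_attribute_selection (sorted_features_list : List (String × Int)) (number_of_top_features : Int) (out : List String) : Prop := out = top_attribute_selection_alt sorted_features_list number_of_top_features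
instance (sorted_features_list : List (String × Int)) (number_of_top_features : Int) (out : List String) : Decidable (Spec_top_attribute_selection sorted_features_list number_of_top_features out) := by unfold Spec_top_attribute_selection; infer_instance

-- ===== CLAIM (what is proved, stated in full; the proofs are below) =====
def Claim_equal_top_attribute_selection : Prop := ∀ (sorted_features_list : List (String × Int)) (number_of_top_features : Int), Dom_top_attribute_selection sorted_features_list number_of_top_features → Spec_top_attribute_selection sorted_features_list number_of_top_features (top_attribute_selection sorted_features_list number_of_top_features)

-- ===== LEMMAS AND PROOFS =====

-- the keys A's dict construction would newly collect, in order (first occurrences not already in `seen`)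
def pvNewKeys : PySem.Set String → List (String × Int) → List String
  | _, [] => []
  | seen, p :: rest =>
    if PySem.Set.contains seen p.1 then pvNewKeys seen rest
    else p.1 :: pvNewKeys (PySem.Set.add seen p.1) rest

theorem pvNewKeys_congr (ps : List (String × Int)) :
    ∀ (s₁ s₂ : PySem.Set String), (∀ x, x ∈ s₁ ↔ x ∈ s₂) → pvNewKeys s₁ ps = pvNewKeys s₂ ps := by
  induction ps with
  | nil => intro _ _ _; rfl
  | cons p rest ih =>
    intro s₁ s₂ h
    by_cases hm : p.1 ∈ s₁
    · have hm₂ : p.1 ∈ s₂ := (h p.1).mp hm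
      simp [pvNewKeys, hm, hm₂, ih _ _ h]
    · have hm₂ : p.1 ∉ s₂ := fun hx => hm ((h p.1).mpr hx)
      have h' : ∀ x, x ∈ (s₁ ++ [p.1]) ↔ x ∈ (s₂ ++ [p.1]) := by
        intro x; simp [h x]
      simp [pvNewKeys, hm, hm₂, ih _ _ h']

-- filtering out a key from the tail is the same as remembering it in the seen-set
theorem pvNewKeys_add_filter (ps : List (String × Int)) :
    ∀ (seen : PySem.Set String) (k : String),
      pvNewKeys (PySem.Set.add seen k) ps = pvNewKeys seen (ps.filter (fun q => q.1 ≠ k)) := by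
  induction ps with
  | nil => intro seen k; rfl
  | cons p rest ih =>
    intro seen k
    by_cases hk : p.1 = k
    · have hm : p.1 ∈ PySem.Set.add seen k := by simp [PySem.Set.mem_add, hk]
      simp [pvNewKeys, hk, List.filter, ih]
    · by_cases hm : p.1 ∈ seen
      · have hm' : p.1 ∈ PySem.Set.add seen k := by simp [PySem.Set.mem_add, hm]
        simp [pvNewKeys, hm', List.filter, hk, hm, ih]
      · have hm' : p.1 ∉ PySem.Set.add seen k := by simp [PySem.Set.mem_add, hm, hk]
        have hstep : ∀ x, x ∈ (PySem.Set.add seen k ++ [p.1] : List String) ↔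
            x ∈ PySem.Set.add (seen ++ [p.1]) k := by
          intro x; simp [PySem.Set.mem_add]; tauto
        have e : pvNewKeys (PySem.Set.add seen k ++ [p.1]) rest
            = pvNewKeys (seen ++ [p.1]) (rest.filter (fun q => q.1 ≠ k)) :=
          (pvNewKeys_congr rest _ _ hstep).trans (ih (seen ++ [p.1]) k)
        simp only [pvNewKeys, List.filter, hk, decide_not] at e ⊢
        simp [pvNewKeys, hm, hm', e]

theorem pvUpdate_eq_append_newKeys (ps : List (String × Int)) :
    ∀ (seen : PySem.Set String),
      PySem.Set.update seen (ps.map (fun p => p.1)) = seen ++ pvNewKeys seen ps := by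
  induction ps with
  | nil => intro seen; simp [pvNewKeys, PySem.Set.update]
  | cons p rest ih =>
    intro seen
    by_cases hm : p.1 ∈ seen
    · simp only [List.map_cons, PySem.Set.update_cons, PySem.Set.add_of_mem hm, ih, pvNewKeys]
      simp [hm]
    · simp only [List.map_cons, PySem.Set.update_cons, PySem.Set.add_of_not_mem hm, ih, pvNewKeys]
      simp [hm]

theorem pvKeys_ofList (ps : List (String × Int)) :
    (PySem.Dict.ofList ps).keys = pvNewKeys PySem.Set.empty ps := by
  have h := PySem.Dict.keys_foldl_insert_key (ν := Int) ps (fun p : String × Int => p.1)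
      (fun _ p => p.2) PySem.Dict.empty
  simp only [PySem.Dict.keys_empty] at h
  show (List.foldl (fun d x => d.insert x.1 x.2) PySem.Dict.empty ps).keys = pvNewKeys PySem.Set.empty ps
  rw [h, pvUpdate_eq_append_newKeys]
  simp [PySem.Set.empty]

-- B's loop computes A's loop on the not-yet-seen first occurrences (induction on a length bound)
theorem pvBGo_eq_aux (n : Int) (m : Nat) : ∀ (pending : List (String × Int)), pending.length ≤ m →
    ∀ result, pvBGo n pending result = pvALoop n result (pvNewKeys PySem.Set.empty pending) := by
  induction m with
  | zero =>
    intro pending h result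
    cases pending with
    | nil => simp [pvBGo, pvNewKeys, pvALoop]
    | cons p rest => simp at h
  | succ m ih =>
    intro pending h result
    cases pending with
    | nil => simp [pvBGo, pvNewKeys, pvALoop]
    | cons p rest =>
      have hadd : PySem.Set.add PySem.Set.empty p.1 = [p.1] := by
        simp [PySem.Set.add, PySem.Set.empty]
      have hfilt := pvNewKeys_add_filter rest PySem.Set.empty p.1
      rw [hadd] at hfilt
      have hlen : (rest.filter (fun q => q.1 ≠ p.1)).length ≤ m :=
        le_trans (List.length_filter_le _ _) (Nat.le_of_succ_le_succ (by simpa using h))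
      by_cases hc : ((result.length : Int) + 1 = n)
      · simp [pvBGo, pvNewKeys, pvALoop, PySem.Set.empty, hc]
      · have ih' := ih _ hlen (result ++ [p.1])
        simp only [decide_not, PySem.Set.empty] at ih'
        simp [pvBGo, pvNewKeys, pvALoop, PySem.Set.empty, hc, hfilt]
        exact ih'

theorem pvBGo_eq_pvALoop (n : Int) (pending : List (String × Int)) (result : List String) :
    pvBGo n pending result = pvALoop n result (pvNewKeys PySem.Set.empty pending) :=
  pvBGo_eq_aux n pending.length pending le_rfl result

-- ===== VERDICT (by name: the statement is the Claim_ definition above) =====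
theorem top_attribute_selection_spec : Claim_equal_top_attribute_selection := by
  intro xs n _
  show top_attribute_selection xs n = top_attribute_selection_alt xs n
  simp only [top_attribute_selection, top_attribute_selection_alt, pvKeys_ofList,
    pvBGo_eq_pvALoop]
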